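-- pv_equiv track=rewrite | github.com/rhoitjadhav/competitive-programming-practice | binarysearch/Counting Dinosaurs.py | solve
-- ===== SOURCE A (Python) =====
-- from collections import Counter
--
-- def solve(animals, dinosaurs):
--     counter = Counter(animals)
--     count = 0
--     for char in dinosaurs:
--         get = counter.get(char)
--         if get:
--             count += get
--             del counter[char]
--
--     return count
-- ===== SOURCE B (Python) =====
-- def solve(animals, dinosaurs):
--     dino = set(dinosaurs)
--     return sum(1 for a in animals if a in dino)
-- ===== Notes on version B (the rewrite author's own statement) =====
-- stated objective: simpler
-- what changed: B builds a set of dinosaur types once and counts matching animals in a single pass over animals, instead of A's Counter over animals followed by a loop over dinosaurs with delete-to-dedup.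
import Mathlib
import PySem

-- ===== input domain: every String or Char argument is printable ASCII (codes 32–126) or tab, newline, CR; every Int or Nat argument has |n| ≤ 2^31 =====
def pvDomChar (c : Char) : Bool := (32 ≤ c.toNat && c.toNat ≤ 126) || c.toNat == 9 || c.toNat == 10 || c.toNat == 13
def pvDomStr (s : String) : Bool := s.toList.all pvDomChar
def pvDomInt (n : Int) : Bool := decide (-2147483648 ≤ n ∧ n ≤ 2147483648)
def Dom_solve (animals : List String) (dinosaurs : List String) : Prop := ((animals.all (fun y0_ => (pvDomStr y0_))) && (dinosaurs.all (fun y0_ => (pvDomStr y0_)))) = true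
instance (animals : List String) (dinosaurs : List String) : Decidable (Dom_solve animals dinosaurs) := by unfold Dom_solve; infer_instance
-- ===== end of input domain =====

-- B builds a set of dinosaur types once and counts matching animals in one pass, instead of A's Counter + delete-to-dedup loop over dinosaurs (simpler).

-- ===== PORT A =====
def solve (animals : List String) (dinosaurs : List String) : Int :=
  let counter := PySem.Dict.counter animals
  let st := dinosaurs.foldl
    (fun (st : PySem.Dict String Int × Int) char =>
      let get := st.1.get? char
      match get with
      | some v => if v ≠ 0 then (st.1.erase char, st.2 + v) else (st.1, st.2)
      | none => (st.1, st.2))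
    (counter, 0)
  st.2

-- ===== PORT B =====
def solve_alt (animals : List String) (dinosaurs : List String) : Int :=
  let dino : PySem.Set String := PySem.Set.ofList dinosaurs
  animals.foldl (fun acc a => if PySem.Set.contains dino a then acc + 1 else acc) 0

-- ===== PRECONDITION & SPEC =====
def Spec_solve (animals : List String) (dinosaurs : List String) (out : Int) : Prop := out = solve_alt animals dinosaurs
instance (animals : List String) (dinosaurs : List String) (out : Int) : Decidable (Spec_solve animals dinosaurs out) := by unfold Spec_solve; infer_instance

-- ===== CLAIM (what is proved, stated in full; the proofs are below) =====
def Claim_equal_solve : Prop := ∀ (animals : List String) (dinosaurs : List String), Dom_solve animals dinosaurs → Spec_solve animals dinosaurs (solve animals dinosaurs)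

-- ===== LEMMAS AND PROOFS =====

theorem find?_filter_ne {κ ν : Type} [BEq κ] [LawfulBEq κ] (k k' : κ) (h : k' ≠ k)
    (l : List (κ × ν)) :
    List.find? (fun p => p.1 == k') (l.filter (fun p => !p.1 == k))
      = List.find? (fun p => p.1 == k') l := by
  induction l with
  | nil => rfl
  | cons p rest ih =>
    rw [List.filter_cons]
    by_cases hp : p.1 = k'
    · have hpk : p.1 ≠ k := by rw [hp]; exact h
      rw [if_pos (by simp [hpk]), List.find?_cons_of_pos (by simp [hp]),
        List.find?_cons_of_pos (by simp [hp])]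
    · by_cases hk : p.1 = k
      · rw [if_neg (by simp [hk]), ih, List.find?_cons_of_neg (by simp [hp])]
      · rw [if_pos (by simp [hk]), List.find?_cons_of_neg (by simp [hp]),
          List.find?_cons_of_neg (by simp [hp]), ih]

theorem dict_get?_erase_self {κ ν : Type} [BEq κ] [LawfulBEq κ] (d : PySem.Dict κ ν) (k : κ) :
    (d.erase k).get? k = none := by
  have hfind : List.find? (fun p => p.1 == k) (d.items.filter (fun p => !p.1 == k)) = none := by
    rw [List.find?_eq_none]
    intro p hp
    have := (List.mem_filter.mp hp).2
    simpa using this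
  simp [PySem.Dict.erase, PySem.Dict.get?, hfind]

theorem dict_get?_erase_of_ne {κ ν : Type} [BEq κ] [LawfulBEq κ] (d : PySem.Dict κ ν) (k k' : κ)
    (h : k' ≠ k) : (d.erase k).get? k' = d.get? k' := by
  simp only [PySem.Dict.erase, PySem.Dict.get?]
  congr 1
  exact find?_filter_ne k k' h d.items

theorem dict_getD_erase {κ ν : Type} [BEq κ] [LawfulBEq κ] [DecidableEq κ] (d : PySem.Dict κ ν)
    (k k' : κ) (d0 : ν) :
    (d.erase k).getD k' d0 = if k' = k then d0 else d.getD k' d0 := by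
  by_cases h : k' = k
  · subst h
    simp [PySem.Dict.getD_eq_get?_getD, dict_get?_erase_self]
  · simp [PySem.Dict.getD_eq_get?_getD, dict_get?_erase_of_ne d k k' h, h]

-- A's loop over dinosaurs, starting from an arbitrary dict and accumulator, adds the
-- getD-value of every distinct dinosaur type (erasure makes later duplicates contribute 0).
theorem solve_loop_sum (ds : List String) (c : PySem.Dict String Int) (k : Int) :
    (ds.foldl
      (fun (st : PySem.Dict String Int × Int) char =>
        let get := st.1.get? char
        match get with
        | some v => if v ≠ 0 then (st.1.erase char, st.2 + v) else (st.1, st.2)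
        | none => (st.1, st.2))
      (c, k)).2 = k + ∑ x ∈ ds.toFinset, c.getD x 0 := by
  induction ds generalizing c k with
  | nil => simp
  | cons d ds ih =>
    simp only [List.foldl_cons, List.toFinset_cons]
    have hsplit : ∀ (hz : c.getD d 0 = 0),
        k + ∑ x ∈ ds.toFinset, c.getD x 0 = k + ∑ x ∈ insert d ds.toFinset, c.getD x 0 := by
      intro hz
      by_cases hd : d ∈ ds.toFinset
      · rw [Finset.insert_eq_self.mpr hd]
      · rw [Finset.sum_insert hd, hz, zero_add]
    cases hg : c.get? d with
    | none =>
      have hz : c.getD d 0 = 0 := by simp [PySem.Dict.getD_eq_get?_getD, hg]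
      simpa [hg] using (ih c k).trans (hsplit hz)
    | some v =>
      have hv : c.getD d 0 = v := by simp [PySem.Dict.getD_eq_get?_getD, hg]
      by_cases hvz : v = 0
      · have hz : c.getD d 0 = 0 := by rw [hv, hvz]
        simpa [hg, hvz] using (ih c k).trans (hsplit hz)
      · simp only [hvz, ne_eq, not_false_eq_true, if_pos]
        rw [ih (c.erase d) (k + v)]
        have h1 : ∑ x ∈ ds.toFinset, (c.erase d).getD x 0
            = ∑ x ∈ ds.toFinset.erase d, c.getD x 0 := by
          rw [← Finset.sum_erase ds.toFinset (f := fun x => (c.erase d).getD x 0) (a := d) (by simp only []; rw [dict_getD_erase]; simp)]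
          exact Finset.sum_congr rfl (fun x hx => by
            rw [dict_getD_erase, if_neg (Finset.ne_of_mem_erase hx)])
        have h2 : v + ∑ x ∈ ds.toFinset.erase d, c.getD x 0
            = ∑ x ∈ insert d ds.toFinset, c.getD x 0 := by
          rw [← Finset.erase_insert_eq_erase, ← hv]
          exact Finset.add_sum_erase _ (fun x => c.getD x 0) (Finset.mem_insert_self d ds.toFinset)
        rw [← h2, h1]
        ring
-- B's loop counts the animals whose type is among the dinosaurs.
theorem alt_loop_count (dinosaurs animals : List String) (k : Int) :
    animals.foldl
      (fun acc a => if PySem.Set.contains (PySem.Set.ofList dinosaurs) a then acc + 1 else acc) k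
      = k + ∑ x ∈ dinosaurs.toFinset, (animals.count x : Int) := by
  induction animals generalizing k with
  | nil => simp
  | cons a rest ih =>
    have hc : PySem.Set.contains (PySem.Set.ofList dinosaurs) a = decide (a ∈ dinosaurs) := by
      simp [PySem.Set.contains, PySem.Set.mem_ofList]
    have hcount : ∀ x : String, (List.count x (a :: rest) : Int)
        = (rest.count x : Int) + if x = a then 1 else 0 := by
      intro x
      rw [List.count_cons]
      by_cases h : x = a
      · simp [h]
      · simp [h, Ne.symm h]
    rw [List.foldl_cons, hc]
    have hsum : ∑ x ∈ dinosaurs.toFinset, ((a :: rest).count x : Int)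
        = (∑ x ∈ dinosaurs.toFinset, (rest.count x : Int))
          + if a ∈ dinosaurs then 1 else 0 := by
      rw [Finset.sum_congr rfl (fun x _ => hcount x), Finset.sum_add_distrib,
        Finset.sum_ite_eq' dinosaurs.toFinset a (fun _ => (1 : Int))]
      simp
    by_cases hmem : a ∈ dinosaurs
    · rw [if_pos (by simp [hmem]), ih, hsum, if_pos hmem]
      ring
    · rw [if_neg (by simp [hmem]), ih, hsum, if_neg hmem]
      ring

-- ===== VERDICT (by name: the statement is the Claim_ definition above) =====
theorem solve_spec : Claim_equal_solve := by
  intro animals dinosaurs _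
  unfold Spec_solve solve solve_alt
  rw [solve_loop_sum, alt_loop_count]
  simp [PySem.Dict.getD_counter]
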